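-- pv_equiv track=rewrite | github.com/MariiaNikitash/Data-Structures-w-Python | CodePath_TIP102/reviewCh4/standart1.py | find_closest_nft_values
-- ===== SOURCE A (Python) =====
-- def find_closest_nft_values(nft_values, budget):
--     l,r = 0, len(nft_values)-1
--     closest_below, closest_above = None, None
--     while l <= r:
--         mid = (l+r) // 2
--         if nft_values[mid] == budget:
--             return nft_values[mid], nft_values[mid]
--         elif nft_values[mid] < budget:
--             closest_below = nft_values[mid]
--             l = mid+1
--         else:
--             closest_above = nft_values[mid]
--             r = mid-1
--     return closest_below, closest_above
-- ===== SOURCE B (Python) =====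
-- def find_closest_nft_values(nft_values, budget):
--     # Recursive descent on actual list segments (slices), no index arithmetic:
--     # the probed element of a segment is at position (len-1)//2, which matches
--     # A's midpoint (l+r)//2 relative to the segment, so the probe sequence is
--     # identical even on unsorted input.
--     def go(seg, below, above):
--         if not seg:
--             return below, above
--         k = (len(seg) - 1) // 2
--         v = seg[k]
--         if v == budget:
--             return v, v
--         if v < budget:
--             return go(seg[k + 1:], v, above)
--         return go(seg[:k], below, v)
--     return go(list(nft_values), None, None)
-- ===== Notes on version B (the rewrite author's own statement) =====
-- stated objective: alternative
-- what changed: A's index-based while loop over (l, r) into the original list is replaced by a pure recursion on actual list segments: each step probes position (len-1)//2 of the current slice and recurses on the sub-slice, so no indices into the original list and no mutable state exist at all.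
import Mathlib
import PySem

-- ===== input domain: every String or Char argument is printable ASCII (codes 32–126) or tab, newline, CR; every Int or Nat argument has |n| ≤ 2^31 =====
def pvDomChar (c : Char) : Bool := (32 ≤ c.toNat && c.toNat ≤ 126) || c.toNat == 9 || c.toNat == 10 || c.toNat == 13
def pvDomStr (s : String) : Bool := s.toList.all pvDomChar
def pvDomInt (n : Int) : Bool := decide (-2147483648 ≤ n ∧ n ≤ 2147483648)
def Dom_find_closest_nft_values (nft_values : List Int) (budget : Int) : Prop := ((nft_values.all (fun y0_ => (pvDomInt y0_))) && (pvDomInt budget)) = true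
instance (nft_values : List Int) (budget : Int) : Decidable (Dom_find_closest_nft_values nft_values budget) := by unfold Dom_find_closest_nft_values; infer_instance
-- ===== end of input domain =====

-- B replaces A's index-based while loop over (l, r) by a pure recursion on list segments (slices); alternative decomposition, same result.

-- ===== PORT A =====
-- A's while loop over state (l, r, closest_below, closest_above); indices stay in range, so pyGet? is always some (the .getD 0 default is unreachable)
def pvLoopA (nft_values : List Int) (budget l r : Int) (below above : Option Int) : Option Int × Option Int :=
  if _h : l ≤ r then
    if (PySem.List.pyGet? nft_values (PySem.Int.floordiv (l + r) 2)).getD 0 = budget then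
      ((PySem.List.pyGet? nft_values (PySem.Int.floordiv (l + r) 2)).getD 0,
       (PySem.List.pyGet? nft_values (PySem.Int.floordiv (l + r) 2)).getD 0)
    else if (PySem.List.pyGet? nft_values (PySem.Int.floordiv (l + r) 2)).getD 0 < budget then
      pvLoopA nft_values budget (PySem.Int.floordiv (l + r) 2 + 1) r
        (some ((PySem.List.pyGet? nft_values (PySem.Int.floordiv (l + r) 2)).getD 0)) above
    else
      pvLoopA nft_values budget l (PySem.Int.floordiv (l + r) 2 - 1) below
        (some ((PySem.List.pyGet? nft_values (PySem.Int.floordiv (l + r) 2)).getD 0))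
  else (below, above)
termination_by (r + 1 - l).toNat
decreasing_by
  · have := PySem.Int.floordiv_two_mid_bounds _h
    omega
  · have := PySem.Int.floordiv_two_mid_bounds _h
    omega

def find_closest_nft_values (nft_values : List Int) (budget : Int) : Option Int × Option Int :=
  pvLoopA nft_values budget 0 ((nft_values.length : Int) - 1) none none

-- ===== PORT B =====
-- go(seg, below, above): recursion on the current segment; seg[k] with 0 ≤ k < len(seg) is exactly seg.getD k 0,
-- and the Python slices seg[k+1:] / seg[:k] (nonnegative in-range bounds) are exactly List.drop / List.take.
def pvGoB (budget : Int) (seg : List Int) (below above : Option Int) : Option Int × Option Int :=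
  if hseg : seg = [] then (below, above)
  else
    let k := (seg.length - 1) / 2
    let v := seg.getD k 0
    if v = budget then (some v, some v)
    else if v < budget then pvGoB budget (seg.drop (k + 1)) (some v) above
    else pvGoB budget (seg.take k) below (some v)
termination_by seg.length
decreasing_by
  · have hne : seg.length ≠ 0 := by simpa [List.length_eq_zero_iff] using hseg
    simp only [List.length_drop]
    omega
  · have hne : seg.length ≠ 0 := by simpa [List.length_eq_zero_iff] using hseg
    simp only [List.length_take]
    omega

def find_closest_nft_values_alt (nft_values : List Int) (budget : Int) : Option Int × Option Int :=
  pvGoB budget nft_values none none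

-- ===== PRECONDITION & SPEC =====
def Spec_find_closest_nft_values (nft_values : List Int) (budget : Int) (out : Option Int × Option Int) : Prop := out = find_closest_nft_values_alt nft_values budget
instance (nft_values : List Int) (budget : Int) (out : Option Int × Option Int) : Decidable (Spec_find_closest_nft_values nft_values budget out) := by unfold Spec_find_closest_nft_values; infer_instance

-- ===== CLAIM (what is proved, stated in full; the proofs are below) =====
def Claim_equal_find_closest_nft_values : Prop := ∀ (nft_values : List Int) (budget : Int), Dom_find_closest_nft_values nft_values budget → Spec_find_closest_nft_values nft_values budget (find_closest_nft_values nft_values budget)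

-- ===== LEMMAS AND PROOFS =====

-- one unfolding of pvGoB on a nonempty segment
theorem pvGoB_ne (budget : Int) (seg : List Int) (hne : seg ≠ []) (below above : Option Int) :
    pvGoB budget seg below above =
      (if seg.getD ((seg.length - 1) / 2) 0 = budget then
        (some (seg.getD ((seg.length - 1) / 2) 0), some (seg.getD ((seg.length - 1) / 2) 0))
      else if seg.getD ((seg.length - 1) / 2) 0 < budget then
        pvGoB budget (seg.drop ((seg.length - 1) / 2 + 1)) (some (seg.getD ((seg.length - 1) / 2) 0)) above
      else
        pvGoB budget (seg.take ((seg.length - 1) / 2)) below (some (seg.getD ((seg.length - 1) / 2) 0))) := by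
  rw [pvGoB]
  simp only [dif_neg hne]

-- A's loop on interval [l, r] equals B's recursion on the corresponding segment of the list.
theorem pvLoopA_eq_goB (nft_values : List Int) (budget : Int) :
    ∀ (l r : Int) (below above : Option Int), 0 ≤ l → r < (nft_values.length : Int) →
      pvLoopA nft_values budget l r below above =
        pvGoB budget ((nft_values.drop l.toNat).take (r + 1 - l).toNat) below above := by
  intro l r below above
  induction l, r, below, above using pvLoopA.induct nft_values budget with
  | case1 l r below above h hv =>
      intro hl hr
      have hm : PySem.Int.floordiv (l + r) 2 = (l + r) / 2 :=
        PySem.Int.floordiv_eq_ediv_of_pos (by norm_num)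
      rw [hm] at hv
      have hlen : ((nft_values.drop l.toNat).take (r + 1 - l).toNat).length = (r + 1 - l).toNat := by
        simp only [List.length_take, List.length_drop]; omega
      have hne : (nft_values.drop l.toNat).take (r + 1 - l).toNat ≠ [] := by
        intro hE; rw [hE] at hlen; simp at hlen; omega
      have hval : ((nft_values.drop l.toNat).take (r + 1 - l).toNat).getD
          (((r + 1 - l).toNat - 1) / 2) 0 =
          (PySem.List.pyGet? nft_values ((l + r) / 2)).getD 0 := by
        rw [List.getD_eq_getElem?_getD, List.getElem?_take_of_lt (by omega),
            List.getElem?_drop,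
            PySem.List.pyGet?_of_nonneg nft_values (show (0 : Int) ≤ (l + r) / 2 by omega)]
        congr 2
        omega
      rw [pvLoopA, pvGoB_ne _ _ hne, hlen]
      simp only [dif_pos h, hm, hval, if_pos hv]
  | case2 l r below above h hv hlt ih =>
      intro hl hr
      have hm : PySem.Int.floordiv (l + r) 2 = (l + r) / 2 :=
        PySem.Int.floordiv_eq_ediv_of_pos (by norm_num)
      rw [hm] at hv hlt ih
      have hlen : ((nft_values.drop l.toNat).take (r + 1 - l).toNat).length = (r + 1 - l).toNat := by
        simp only [List.length_take, List.length_drop]; omega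
      have hne : (nft_values.drop l.toNat).take (r + 1 - l).toNat ≠ [] := by
        intro hE; rw [hE] at hlen; simp at hlen; omega
      have hval : ((nft_values.drop l.toNat).take (r + 1 - l).toNat).getD
          (((r + 1 - l).toNat - 1) / 2) 0 =
          (PySem.List.pyGet? nft_values ((l + r) / 2)).getD 0 := by
        rw [List.getD_eq_getElem?_getD, List.getElem?_take_of_lt (by omega),
            List.getElem?_drop,
            PySem.List.pyGet?_of_nonneg nft_values (show (0 : Int) ≤ (l + r) / 2 by omega)]
        congr 2
        omega
      have hseg : ((nft_values.drop l.toNat).take (r + 1 - l).toNat).drop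
            (((r + 1 - l).toNat - 1) / 2 + 1) =
          (nft_values.drop ((l + r) / 2 + 1).toNat).take (r + 1 - ((l + r) / 2 + 1)).toNat := by
        have e1 : (r + 1 - l).toNat - (((r + 1 - l).toNat - 1) / 2 + 1) =
            (r + 1 - ((l + r) / 2 + 1)).toNat := by omega
        have e2 : l.toNat + (((r + 1 - l).toNat - 1) / 2 + 1) = ((l + r) / 2 + 1).toNat := by omega
        rw [List.drop_take, List.drop_drop, e1, e2]
      rw [pvLoopA, pvGoB_ne _ _ hne, hlen]
      simp only [dif_pos h, hm, hval, if_neg hv, if_pos hlt]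
      rw [hseg]
      exact ih (by omega) hr
  | case3 l r below above h hv hlt ih =>
      intro hl hr
      have hm : PySem.Int.floordiv (l + r) 2 = (l + r) / 2 :=
        PySem.Int.floordiv_eq_ediv_of_pos (by norm_num)
      rw [hm] at hv hlt ih
      have hlen : ((nft_values.drop l.toNat).take (r + 1 - l).toNat).length = (r + 1 - l).toNat := by
        simp only [List.length_take, List.length_drop]; omega
      have hne : (nft_values.drop l.toNat).take (r + 1 - l).toNat ≠ [] := by
        intro hE; rw [hE] at hlen; simp at hlen; omega
      have hval : ((nft_values.drop l.toNat).take (r + 1 - l).toNat).getD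
          (((r + 1 - l).toNat - 1) / 2) 0 =
          (PySem.List.pyGet? nft_values ((l + r) / 2)).getD 0 := by
        rw [List.getD_eq_getElem?_getD, List.getElem?_take_of_lt (by omega),
            List.getElem?_drop,
            PySem.List.pyGet?_of_nonneg nft_values (show (0 : Int) ≤ (l + r) / 2 by omega)]
        congr 2
        omega
      have hseg : ((nft_values.drop l.toNat).take (r + 1 - l).toNat).take
            (((r + 1 - l).toNat - 1) / 2) =
          (nft_values.drop l.toNat).take ((l + r) / 2 - 1 + 1 - l).toNat := by
        rw [List.take_take, Nat.min_eq_left (by omega)]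
        congr 1
        omega
      rw [pvLoopA, pvGoB_ne _ _ hne, hlen]
      simp only [dif_pos h, hm, hval, if_neg hv, if_neg hlt]
      rw [hseg]
      exact ih hl (by omega)
  | case4 l r below above h =>
      intro hl hr
      have h0 : (r + 1 - l).toNat = 0 := by omega
      rw [pvLoopA, pvGoB]
      simp [h, h0]

-- ===== VERDICT (by name: the statement is the Claim_ definition above) =====
theorem find_closest_nft_values_spec : Claim_equal_find_closest_nft_values := by
  intro nft_values budget _
  unfold Spec_find_closest_nft_values find_closest_nft_values find_closest_nft_values_alt
  rw [pvLoopA_eq_goB nft_values budget 0 ((nft_values.length : Int) - 1) none none (by omega) (by omega)]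
  congr 1
  simp
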